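-- pv_equiv track=rewrite | github.com/rligithub/Leetcode | Hashmap/890. Find and Replace Pattern.py | convert2code
-- ===== SOURCE A (Python) =====
-- def convert2code(word):
--     num = 0
--     seen = {}
--     code = ""
--     for ch in word:
--         if ch not in seen:
--             num += 1
--             seen[ch] = chr(ord('a') + num)
--             code += chr(ord('a') + num)
--         else:
--             code += seen[ch]
--     return code
-- ===== SOURCE B (Python) =====
-- def convert2code(word):
--     # Per-character closed formula, no shared state between positions:
--     # each character's code is 'a' + (number of distinct characters in the
--     # prefix of word ending at that character's FIRST occurrence).
--     return ''.join(chr(ord('a') + len(set(word[:word.index(c) + 1]))) for c in word)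
-- ===== Notes on version B (the rewrite author's own statement) =====
-- stated objective: alternative
-- what changed: B replaces A's stateful single pass (counter + seen-dict + growing string) by a stateless per-character closed formula: each output character is computed directly as chr(97 + number of distinct characters in the prefix of word ending at that character's first occurrence); no mapping table or counter is maintained.
import Mathlib
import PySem

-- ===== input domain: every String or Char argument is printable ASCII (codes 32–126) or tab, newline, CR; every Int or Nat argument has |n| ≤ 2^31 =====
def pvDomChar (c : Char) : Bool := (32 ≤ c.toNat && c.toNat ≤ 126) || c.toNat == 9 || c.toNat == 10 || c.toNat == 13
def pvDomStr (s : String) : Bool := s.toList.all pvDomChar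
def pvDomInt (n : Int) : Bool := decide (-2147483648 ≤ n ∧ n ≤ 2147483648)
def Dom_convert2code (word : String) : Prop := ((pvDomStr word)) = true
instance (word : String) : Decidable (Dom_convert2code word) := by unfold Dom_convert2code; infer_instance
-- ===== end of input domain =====

-- B computes each output character by a stateless per-character formula (distinct count of
-- the prefix up to the character's first occurrence) instead of A's counter/dict/accumulator
-- pass. Objective: alternative; equal return values everywhere.

-- ===== PORT A =====
-- one loop iteration of A: state = (num, seen, code)
def convert2codeStep (st : Nat × PySem.Dict Char Char × List Char) (ch : Char) :
    Nat × PySem.Dict Char Char × List Char :=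
  match st with
  | (num, seen, code) =>
    if ¬ seen.contains ch then
      (num + 1, seen.insert ch (Char.ofNat (97 + (num + 1))),
        code ++ [Char.ofNat (97 + (num + 1))])
    else
      (num, seen, code ++ [(seen.get? ch).getD ' '])  -- key always present in this branch

def convert2code (word : String) : String :=
  String.ofList (word.toList.foldl convert2codeStep (0, PySem.Dict.empty, [])).2.2

-- ===== PORT B =====
-- word[:k] with k = word.index(c)+1 ≥ 0 is take k (PySem.List.slice_to_natCast);
-- str.index never raises here since c ranges over word itself, so '.getD 0' is exact.
def convert2code_alt (word : String) : String :=
  String.ofList (word.toList.map (fun c =>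
    Char.ofNat (97 + (PySem.Set.ofList
      (word.toList.take (((PySem.List.index? word.toList c).getD 0) + 1))).length)))

-- ===== PRECONDITION & SPEC =====
def Spec_convert2code (word : String) (out : String) : Prop := out = convert2code_alt word
instance (word : String) (out : String) : Decidable (Spec_convert2code word out) := by unfold Spec_convert2code; infer_instance

-- ===== CLAIM (what is proved, stated in full; the proofs are below) =====
def Claim_equal_convert2code : Prop := ∀ (word : String), Dom_convert2code word → Spec_convert2code word (convert2code word)

-- ===== LEMMAS AND PROOFS =====

-- canonical code character of c relative to word w: 'b' + first-seen position
def gmap (w : List Char) (c : Char) : Char :=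
  Char.ofNat (98 + (PySem.List.dedup w).idxOf c)

lemma dedup_append_singleton (p : List Char) (ch : Char) :
    PySem.List.dedup (p ++ [ch]) =
      if ch ∈ p then PySem.List.dedup p else PySem.List.dedup p ++ [ch] := by
  have h2 : PySem.List.dedup (p ++ [ch]) = PySem.Set.add (PySem.List.dedup p) ch := by
    simp [PySem.List.dedup_eq_ofList, PySem.Set.ofList_eq_foldl, List.foldl_append]
  rw [h2]
  simp [PySem.Set.add, PySem.Set.contains]

lemma get?_insert' (d : PySem.Dict Char Char) (k v c : Char) :
    (d.insert k v).get? c = if k == c then some v else d.get? c := by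
  by_cases h : k = c
  · simp [h, PySem.Dict.get?_insert_self]
  · simp [h, PySem.Dict.get?_insert_of_ne d v (Ne.symm h)]

lemma loopA_inv (rest : List Char) : ∀ (p : List Char) (num : Nat)
    (seen : PySem.Dict Char Char) (code : List Char),
    num = (PySem.List.dedup p).length →
    (∀ c, seen.get? c = if c ∈ p then some (gmap p c) else none) →
    code = p.map (gmap p) →
    (rest.foldl convert2codeStep (num, seen, code)).2.2 =
      (p ++ rest).map (gmap (p ++ rest)) := by
  induction rest with
  | nil =>
    intro p num seen code _ _ h3
    simpa using h3
  | cons ch rest ih =>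
    intro p num seen code h1 h2 h3
    have hcon : seen.contains ch = decide (ch ∈ p) := by
      rw [PySem.Dict.contains_eq_isSome_get?, h2 ch]
      by_cases h : ch ∈ p <;> simp [h]
    by_cases hmem : ch ∈ p
    · -- repeated character: else branch, state unchanged except code
      have hD : PySem.List.dedup (p ++ [ch]) = PySem.List.dedup p := by
        rw [dedup_append_singleton]; simp [hmem]
      have hg : gmap (p ++ [ch]) = gmap p := by
        funext c; unfold gmap; rw [hD]
      have h1' : num = (PySem.List.dedup (p ++ [ch])).length := by rw [hD]; exact h1
      have h2' : ∀ c, seen.get? c =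
          if c ∈ p ++ [ch] then some (gmap (p ++ [ch]) c) else none := by
        intro c; rw [h2 c, hg]
        by_cases hc : c ∈ p
        · simp [hc]
        · have hnc : c ∉ p ++ [ch] := by
            simp only [List.mem_append, List.mem_singleton]
            rintro (h | rfl)
            · exact hc h
            · exact hc hmem
          simp [hc, hnc]
      have h3' : code ++ [(seen.get? ch).getD ' '] = (p ++ [ch]).map (gmap (p ++ [ch])) := by
        rw [hg, List.map_append, ← h3, h2 ch]; simp [hmem]
      have hrec := ih (p ++ [ch]) num seen _ h1' h2' h3'
      have hstep : convert2codeStep (num, seen, code) ch =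
          (num, seen, code ++ [(seen.get? ch).getD ' ']) := by
        simp [convert2codeStep, hcon, hmem]
      rw [List.foldl_cons, hstep]
      simpa [List.append_assoc] using hrec
    · -- fresh character: then branch
      have hD : PySem.List.dedup (p ++ [ch]) = PySem.List.dedup p ++ [ch] := by
        rw [dedup_append_singleton]; simp [hmem]
      have hchD : ch ∉ PySem.List.dedup p := fun h =>
        hmem ((PySem.List.mem_dedup _ _).mp h)
      have hgnew : gmap (p ++ [ch]) ch = Char.ofNat (97 + (num + 1)) := by
        unfold gmap
        rw [hD, List.idxOf_append_of_notMem hchD]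
        simp only [List.idxOf_cons_self, Nat.add_zero]
        congr 1
        omega
      have hgstable : ∀ c ∈ p, gmap (p ++ [ch]) c = gmap p c := by
        intro c hc
        unfold gmap
        rw [hD, List.idxOf_append_of_mem ((PySem.List.mem_dedup _ _).mpr hc)]
      have h1' : num + 1 = (PySem.List.dedup (p ++ [ch])).length := by
        rw [hD]; simp [h1]
      have h2' : ∀ c, (seen.insert ch (Char.ofNat (97 + (num + 1)))).get? c =
          if c ∈ p ++ [ch] then some (gmap (p ++ [ch]) c) else none := by
        intro c
        rw [get?_insert']
        by_cases hc : ch = c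
        · subst hc; simp [hgnew]
        · simp only [beq_iff_eq, hc, if_false]
          rw [h2 c]
          by_cases hcp : c ∈ p
          · simp [hcp, hgstable c hcp]
          · have hnc : c ∉ p ++ [ch] := by
              simp only [List.mem_append, List.mem_singleton]
              rintro (h | rfl)
              · exact hcp h
              · exact hc rfl
            simp [hcp, hnc]
      have h3' : code ++ [Char.ofNat (97 + (num + 1))] =
          (p ++ [ch]).map (gmap (p ++ [ch])) := by
        rw [List.map_append, h3]
        have : p.map (gmap (p ++ [ch])) = p.map (gmap p) :=
          List.map_congr_left hgstable
        rw [this]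
        simp [hgnew]
      have hrec := ih (p ++ [ch]) (num + 1) _ _ h1' h2' h3'
      have hstep : convert2codeStep (num, seen, code) ch =
          (num + 1, seen.insert ch (Char.ofNat (97 + (num + 1))),
            code ++ [Char.ofNat (97 + (num + 1))]) := by
        simp [convert2codeStep, hcon, hmem]
      rw [List.foldl_cons, hstep]
      simpa [List.append_assoc] using hrec

lemma convert2code_eq_gmap (w : String) :
    convert2code w = String.ofList (w.toList.map (gmap w.toList)) := by
  unfold convert2code
  congr 1
  have := loopA_inv w.toList [] 0 PySem.Dict.empty []
    (by simp [PySem.List.dedup_eq_ofList, PySem.Set.ofList_eq_foldl])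
    (by intro c; simp)
    (by simp)
  simpa using this

-- distinct-count of the prefix ending at c's first occurrence = first-seen rank of c + 1
lemma prefix_dedup_len : ∀ (w : List Char) (c : Char), c ∈ w →
    (PySem.List.dedup (w.take (((PySem.List.index? w c).getD 0) + 1))).length
      = (PySem.List.dedup w).idxOf c + 1 := by
  intro w
  induction w using List.reverseRecOn with
  | nil => intro c hc; simp at hc
  | append_singleton p ch ih =>
    intro c hc
    by_cases hcp : c ∈ p
    · -- c occurs in p: both sides reduce to the statement for p
      have hidx : PySem.List.index? (p ++ [ch]) c = PySem.List.index? p c :=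
        PySem.List.index?_append_of_mem [ch] hcp
      obtain ⟨i, hi⟩ := Option.isSome_iff_exists.mp
        ((PySem.List.index?_isSome_iff p c).mpr hcp)
      obtain ⟨hik, _, _⟩ := PySem.List.getElem_of_index?_eq_some hi
      have htake : (p ++ [ch]).take (i + 1) = p.take (i + 1) :=
        List.take_append_of_le_length (by omega)
      rw [hidx, hi]
      simp only [Option.getD_some]
      rw [htake]
      have hL := ih c hcp
      rw [hi] at hL
      simp only [Option.getD_some] at hL
      rw [hL]
      rw [dedup_append_singleton]
      by_cases hch : ch ∈ p
      · simp [hch]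
      · rw [if_neg hch,
          List.idxOf_append_of_mem ((PySem.List.mem_dedup _ _).mpr hcp)]
    · -- c = ch, fresh: prefix is the whole word
      have hceq : c = ch := by
        rcases List.mem_append.mp hc with h | h
        · exact absurd h hcp
        · simpa using h
      subst hceq
      rw [PySem.List.index?_append_singleton_self p c hcp]
      simp only [Option.getD_some]
      have htake : (p ++ [c]).take (p.length + 1) = p ++ [c] := by
        apply List.take_of_length_le; simp
      rw [htake, dedup_append_singleton, if_neg hcp]
      have hchD : c ∉ PySem.List.dedup p := fun h =>
        hcp ((PySem.List.mem_dedup _ _).mp h)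
      rw [List.idxOf_append_of_notMem hchD]
      simp

lemma convert2code_alt_eq_gmap (w : String) :
    convert2code_alt w = String.ofList (w.toList.map (gmap w.toList)) := by
  unfold convert2code_alt
  congr 1
  apply List.map_congr_left
  intro c hc
  have h := prefix_dedup_len w.toList c hc
  rw [PySem.List.dedup_eq_ofList] at h
  rw [h]
  unfold gmap
  congr 1
  omega

-- ===== VERDICT (by name: the statement is the Claim_ definition above) =====
theorem convert2code_spec : Claim_equal_convert2code := by
  intro word _
  unfold Spec_convert2code
  rw [convert2code_eq_gmap, convert2code_alt_eq_gmap]
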